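-- pv_equiv track=rewrite | github.com/LeonDev633/Py | Mundo 2 Python/TESTE.py | processando_posi_nega
-- ===== SOURCE A (Python) =====
-- def processando_posi_nega (a):
--     quantidade_negativo=0
--     quantidade_positivo=0
--     for numero in a:
--         if numero >=0:
--             quantidade_positivo+=1
--         else:
--             quantidade_negativo+=1
--     return quantidade_negativo, quantidade_positivo
-- ===== SOURCE B (Python) =====
-- def processando_posi_nega(a):
--     s = sorted(a)
--     lo, hi = 0, len(s)
--     while lo < hi:
--         mid = (lo + hi) // 2
--         if s[mid] < 0:
--             lo = mid + 1
--         else: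
--             hi = mid
--     return lo, len(s) - lo
-- ===== Notes on version B (the rewrite author's own statement) =====
-- stated objective: alternative
-- what changed: B sorts the list and binary-searches for the first non-negative element; its index is the negative count and the rest of the length is the non-negative count, replacing A's single counting pass by sort + O(log n) bisection.
import Mathlib
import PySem

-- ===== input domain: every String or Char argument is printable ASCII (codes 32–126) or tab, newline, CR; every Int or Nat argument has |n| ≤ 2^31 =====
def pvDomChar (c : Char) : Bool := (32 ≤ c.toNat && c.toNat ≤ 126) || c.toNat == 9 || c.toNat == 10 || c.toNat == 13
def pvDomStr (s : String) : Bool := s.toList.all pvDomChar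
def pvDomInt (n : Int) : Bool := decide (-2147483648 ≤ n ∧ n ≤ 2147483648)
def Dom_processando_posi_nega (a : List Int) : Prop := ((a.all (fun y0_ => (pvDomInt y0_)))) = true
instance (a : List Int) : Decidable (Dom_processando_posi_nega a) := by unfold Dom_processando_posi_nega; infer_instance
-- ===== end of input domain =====

-- B sorts the list and binary-searches for the first non-negative element, so the negative
-- count is that index and the non-negative count is the remaining length (alternative algorithm).

-- ===== PORT A =====
def processando_posi_nega (a : List Int) : Int × Int :=
  let st := a.foldl (fun (q : Int × Int) numero =>
    if numero ≥ 0 then (q.1, q.2 + 1) else (q.1 + 1, q.2)) (0, 0)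
  (st.1, st.2)

-- ===== PORT B =====
-- Python's while-loop bisection; lo/hi stay in 0..len so Nat `/ 2` is exactly Python's `// 2`.
-- The `none` branch of the index guard is unreachable (mid < hi ≤ len on every call) and only
-- makes the function total.
def pvBisect (s : List Int) (lo hi : Nat) : Nat :=
  if _h : lo < hi then
    let mid := (lo + hi) / 2
    match PySem.List.pyGet? s (mid : Int) with
    | some v => if v < 0 then pvBisect s (mid + 1) hi else pvBisect s lo mid
    | none => lo
  else lo
termination_by hi - lo
decreasing_by all_goals omega

def processando_posi_nega_alt (a : List Int) : Int × Int :=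
  let s := PySem.List.sorted a (fun x => x) false
  let lo := pvBisect s 0 s.length
  ((lo : Int), (s.length : Int) - lo)

-- ===== PRECONDITION & SPEC =====
def Spec_processando_posi_nega (a : List Int) (out : Int × Int) : Prop := out = processando_posi_nega_alt a
instance (a : List Int) (out : Int × Int) : Decidable (Spec_processando_posi_nega a out) := by unfold Spec_processando_posi_nega; infer_instance

-- ===== CLAIM (what is proved, stated in full; the proofs are below) =====
def Claim_equal_processando_posi_nega : Prop := ∀ (a : List Int), Dom_processando_posi_nega a → Spec_processando_posi_nega a (processando_posi_nega a)

-- ===== LEMMAS AND PROOFS =====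

-- A's fold counts negatives and non-negatives.
lemma ppn_fold (a : List Int) (n p : Int) :
    a.foldl (fun (q : Int × Int) numero =>
      if numero ≥ 0 then (q.1, q.2 + 1) else (q.1 + 1, q.2)) (n, p)
    = (n + (a.countP (fun x => decide (x < 0)) : Int),
       p + ((a.length : Int) - (a.countP (fun x => decide (x < 0)) : Int))) := by
  induction a generalizing n p with
  | nil => simp
  | cons x xs ih =>
    by_cases h : x ≥ 0
    · have hx : ¬ x < 0 := by omega
      simp [List.foldl, h, hx, ih]; omega
    · have hx : x < 0 := by omega
      simp [List.foldl, h, hx, ih]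
      omega

-- If the first k elements are negative and the rest non-negative, the negative count is k.
lemma count_of_split (s : List Int) : ∀ k, k ≤ s.length →
    (∀ i (h : i < s.length), i < k → s[i] < 0) →
    (∀ i (h : i < s.length), k ≤ i → 0 ≤ s[i]) →
    s.countP (fun x => decide (x < 0)) = k := by
  induction s with
  | nil => intro k hk _ _; simp at hk ⊢; omega
  | cons x xs ih =>
    intro k hk hl hr
    cases k with
    | zero =>
      have hx : 0 ≤ x := hr 0 (by simp) (by omega)
      have : xs.countP (fun x => decide (x < 0)) = 0 :=
        ih 0 (by omega) (by intro i h hi; omega)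
          (by intro i h _; exact hr (i+1) (by simp; omega) (by omega))
      simp [this, show ¬ x < 0 from by omega]
    | succ k' =>
      have hx : x < 0 := hl 0 (by simp) (by omega)
      have : xs.countP (fun x => decide (x < 0)) = k' :=
        ih k' (by simp at hk; omega)
          (by intro i h hi; exact hl (i+1) (by simp; omega) (by omega))
          (by intro i h hi; exact hr (i+1) (by simp; omega) (by omega))
      simp [this, hx]

-- Invariant proof of the bisection: on a ≤-sorted list, starting from (0, len) it
-- returns the number of negative elements.
lemma pvBisect_count (s : List Int) (hs : s.Pairwise (· ≤ ·)) :
    ∀ lo hi, lo ≤ hi → hi ≤ s.length →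
    (∀ i (h : i < s.length), i < lo → s[i] < 0) →
    (∀ i (h : i < s.length), hi ≤ i → 0 ≤ s[i]) →
    (pvBisect s lo hi : Nat) = s.countP (fun x => decide (x < 0)) := by
  have mono : ∀ i j (hi : i < s.length) (hj : j < s.length), i ≤ j → s[i] ≤ s[j] := by
    intro i j hi hj hij
    rcases Nat.lt_or_ge i j with h | h
    · exact List.pairwise_iff_getElem.mp hs i j hi hj h
    · have : i = j := by omega
      subst this; rfl
  intro lo hi
  induction lo, hi using pvBisect.induct s with
  | case1 lo hi h mid v hv hneg ih =>
    intro _ hhi hl hr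
    have hmid : (lo + hi) / 2 < s.length := by omega
    have hv2 : PySem.List.pyGet? s (((lo + hi) / 2 : Nat) : Int) = some v := hv
    have hvs : v = s[(lo + hi) / 2]'hmid := by
      rw [PySem.List.pyGet?_natCast, List.getElem?_eq_getElem hmid] at hv2
      exact (Option.some.inj hv2).symm
    rw [pvBisect]
    simp only [dif_pos h, hv2, if_pos hneg]
    exact ih (by omega) hhi
      (by intro i hilen hlt
          have : s[i] ≤ s[(lo + hi) / 2]'hmid := mono i _ hilen hmid (by omega)
          omega)
      hr
  | case2 lo hi h mid v hv hnneg ih =>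
    intro hlo hhi hl hr
    have hmid : (lo + hi) / 2 < s.length := by omega
    have hv2 : PySem.List.pyGet? s (((lo + hi) / 2 : Nat) : Int) = some v := hv
    have hvs : v = s[(lo + hi) / 2]'hmid := by
      rw [PySem.List.pyGet?_natCast, List.getElem?_eq_getElem hmid] at hv2
      exact (Option.some.inj hv2).symm
    rw [pvBisect]
    simp only [dif_pos h, hv2, if_neg hnneg]
    exact ih (by omega) (by omega) hl
      (by intro i hilen hge
          have : s[(lo + hi) / 2]'hmid ≤ s[i] := mono _ i hmid hilen (by omega)
          omega)
  | case3 lo hi h mid hv =>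
    intro hlo hhi hl hr
    have hmid : (lo + hi) / 2 < s.length := by omega
    have hv2 : PySem.List.pyGet? s (((lo + hi) / 2 : Nat) : Int) = none := hv
    rw [PySem.List.pyGet?_natCast, List.getElem?_eq_getElem hmid] at hv2
    exact absurd hv2 (by simp)
  | case4 lo hi h =>
    intro hlo hhi hl hr
    rw [pvBisect]
    simp only [dif_neg h]
    exact (count_of_split s lo (by omega) hl (by intro i hi hli; exact hr i hi (by omega))).symm

-- ===== VERDICT (by name: the statement is the Claim_ definition above) =====
theorem processando_posi_nega_spec : Claim_equal_processando_posi_nega := by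
  intro a _
  unfold Spec_processando_posi_nega processando_posi_nega processando_posi_nega_alt
  simp only [ppn_fold]
  have hs := PySem.List.sorted_pairwise a (fun x => x) (κ := Int)
  have hperm := PySem.List.sorted_perm a (fun x => x) false
  have hcount : (PySem.List.sorted a (fun x => x) false).countP (fun x => decide (x < 0))
      = a.countP (fun x => decide (x < 0)) := hperm.countP_eq _
  have hlen : (PySem.List.sorted a (fun x => x) false).length = a.length := hperm.length_eq
  have hb := pvBisect_count (PySem.List.sorted a (fun x => x) false) (by simpa using hs)
      0 (PySem.List.sorted a (fun x => x) false).length (by omega) (le_refl _)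
      (by intro i h hi; omega) (by intro i h hi; omega)
  rw [hb]
  simp only [hcount, hlen, Prod.mk.injEq]
  refine ⟨by omega, by omega⟩
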